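-- pv_equiv track=rewrite | github.com/matthewnechita/sEMG-Drive | eval_metrics/plot_model_accuracy_bars.py | _latest_rows
-- ===== SOURCE A (Python) =====
-- def _infer_model_family(row):
--     family = str(row.get("model_family") or "").strip().lower()
--     if family:
--         return family
--     joined = " ".join(
--         str(row.get(key) or "").strip().lower()
--         for key in ("filename", "path")
--     )
--     if "tcn" in joined:
--         return "metric_tcn"
--     if "cnn" in joined or "v6" in joined:
--         return "cnn_v2"
--     return "unknown"
--
-- def _latest_rows(rows):
--     latest = {}
--     for row in rows:
--         key = (
--             str(row.get("bundle_scope") or "").strip().lower(),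
--             str(row.get("arm") or "").strip().lower(),
--             str(row.get("subject") or "").strip().lower(),
--             str(row.get("gesture_bucket") or "").strip().lower(),
--             _infer_model_family(row),
--         )
--         created_at = str(row.get("created_at") or "").strip()
--         current = latest.get(key)
--         if current is None or created_at > str(current.get("created_at") or "").strip():
--             latest[key] = row
--     return list(latest.values())
-- ===== SOURCE B (Python) =====
-- def _infer_model_family(row):
--     family = str(row.get("model_family") or "").strip().lower()
--     if family:
--         return family
--     joined = " ".join(
--         str(row.get(key) or "").strip().lower()
--         for key in ("filename", "path")
--     )
--     if "tcn" in joined: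
--         return "metric_tcn"
--     if "cnn" in joined or "v6" in joined:
--         return "cnn_v2"
--     return "unknown"
--
-- def _latest_rows(rows):
--     # Pass 1: group rows by their composite key, preserving first-seen key order.
--     groups = {}
--     for row in rows:
--         key = (
--             str(row.get("bundle_scope") or "").strip().lower(),
--             str(row.get("arm") or "").strip().lower(),
--             str(row.get("subject") or "").strip().lower(),
--             str(row.get("gesture_bucket") or "").strip().lower(),
--             _infer_model_family(row),
--         )
--         groups.setdefault(key, []).append(row)
--     # Pass 2: pick the row with the greatest created_at per group
--     # (max returns the first maximal element, matching strict-'>' keep-first ties).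
--     return [
--         max(group, key=lambda r: str(r.get("created_at") or "").strip())
--         for group in groups.values()
--     ]
-- ===== Notes on version B (the rewrite author's own statement) =====
-- stated objective: alternative
-- what changed: Replaces the single-pass running-best dict with a two-pass group-then-select: first group rows by the composite key into lists, then pick each group's row with maximal created_at via max (first maximal element reproduces the strict-'>' first-seen tie-break).
import Mathlib
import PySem

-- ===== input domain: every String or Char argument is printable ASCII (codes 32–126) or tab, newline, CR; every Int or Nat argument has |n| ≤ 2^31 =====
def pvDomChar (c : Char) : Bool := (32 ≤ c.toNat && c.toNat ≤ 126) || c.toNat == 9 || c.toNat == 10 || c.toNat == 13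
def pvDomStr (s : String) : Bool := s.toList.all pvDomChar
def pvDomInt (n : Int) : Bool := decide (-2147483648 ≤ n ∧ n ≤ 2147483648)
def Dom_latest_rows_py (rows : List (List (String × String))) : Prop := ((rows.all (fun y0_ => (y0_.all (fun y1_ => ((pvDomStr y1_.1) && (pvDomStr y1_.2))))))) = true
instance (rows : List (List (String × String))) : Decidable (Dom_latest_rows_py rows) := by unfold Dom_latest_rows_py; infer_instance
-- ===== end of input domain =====

-- B replaces A's single-pass running-best dict with group-by-key then pick max(created_at) per group (same cost, different decomposition).

-- ===== PORT A =====
-- shared helpers: both Pythons compute the composite key / created_at identically (B reuses A's literal key code)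

-- str(row.get(k) or "").strip().lower()  (missing key and falsy "" both yield "")
def pvField (row : List (String × String)) (k : String) : String :=
  PySem.Str.lower (PySem.Str.strip (PySem.Dict.getD ⟨row⟩ k ""))

-- _infer_model_family
def pvInferFamily (row : List (String × String)) : String :=
  let family := pvField row "model_family"
  if family ≠ "" then family
  else
    let joined := PySem.Str.join " " [pvField row "filename", pvField row "path"]
    if PySem.Str.isIn "tcn" joined then "metric_tcn"
    else if PySem.Str.isIn "cnn" joined || PySem.Str.isIn "v6" joined then "cnn_v2"
    else "unknown"

def pvKey (row : List (String × String)) : String × String × String × String × String :=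
  (pvField row "bundle_scope", pvField row "arm", pvField row "subject",
   pvField row "gesture_bucket", pvInferFamily row)

-- str(row.get("created_at") or "").strip()
def pvCreated (row : List (String × String)) : String :=
  PySem.Str.strip (PySem.Dict.getD ⟨row⟩ "created_at" "")

def latest_rows_py (rows : List (List (String × String))) : List (List (String × String)) :=
  (rows.foldl
    (fun latest row =>
      let key := pvKey row
      let created := pvCreated row
      match latest.get? key with
      | none => latest.insert key row
      | some current => if pvCreated current < created then latest.insert key row else latest)
    PySem.Dict.empty).values

-- ===== PORT B =====
def latest_rows_py_alt (rows : List (List (String × String))) : List (List (String × String)) :=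
  let groups := rows.foldl
    (fun g row => g.modify (pvKey row) [] (· ++ [row]))
    PySem.Dict.empty
  groups.values.map (fun group =>
    -- max(group, key=created_at); the none case is Python's ValueError on an empty group, never reached
    match PySem.List.max? group pvCreated with
    | some r => r
    | none => [])

-- ===== PRECONDITION & SPEC =====
def Spec_latest_rows_py (rows : List (List (String × String))) (out : List (List (String × String))) : Prop := out = latest_rows_py_alt rows
instance (rows : List (List (String × String))) (out : List (List (String × String))) : Decidable (Spec_latest_rows_py rows out) := by unfold Spec_latest_rows_py; infer_instance

-- ===== CLAIM (what is proved, stated in full; the proofs are below) =====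
def Claim_equal_latest_rows_py : Prop := ∀ (rows : List (List (String × String))), Dom_latest_rows_py rows → Spec_latest_rows_py rows (latest_rows_py rows)

-- ===== LEMMAS AND PROOFS =====

-- the value A's dict holds for a group g (first row wins ties, strict '>')
def pvBest : List (List (String × String)) → List (String × String)
  | [] => []
  | x :: t => t.foldl (fun b r => if pvCreated b < pvCreated r then r else b) x

def pvMapVal (b : PySem.Dict (String × String × String × String × String) (List (List (String × String)))) :
    PySem.Dict (String × String × String × String × String) (List (String × String)) :=
  ⟨b.items.map (fun p => (p.1, pvBest p.2))⟩

theorem pvBest_append (g : List (List (String × String))) (hg : g ≠ []) (row : List (String × String)) :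
    pvBest (g ++ [row]) = if pvCreated (pvBest g) < pvCreated row then row else pvBest g := by
  cases g with
  | nil => simp at hg
  | cons x t => simp [pvBest, List.foldl_append]

theorem pvMax?_cons (t : List (List (String × String))) : ∀ (x : List (String × String)),
    PySem.List.max? (x :: t) pvCreated
      = some (t.foldl (fun b r => if pvCreated b < pvCreated r then r else b) x) := by
  induction t with
  | nil => intro x; rfl
  | cons y t ih =>
    intro x
    have h2 : PySem.List.max? (x :: y :: t) pvCreated
        = PySem.List.max? ((if pvCreated x < pvCreated y then y else x) :: t) pvCreated := by
      change List.foldl _ (if pvCreated x < pvCreated y then some y else some x) t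
        = List.foldl _ (some (if pvCreated x < pvCreated y then y else x)) t
      split <;> rfl
    rw [h2, ih]
    rfl

theorem pvMax?_eq_pvBest (g : List (List (String × String))) (hg : g ≠ []) :
    PySem.List.max? g pvCreated = some (pvBest g) := by
  cases g with
  | nil => simp at hg
  | cons x t => exact pvMax?_cons t x

theorem pvKeys_mapVal (b : PySem.Dict (String × String × String × String × String) (List (List (String × String)))) :
    (pvMapVal b).keys = b.keys := by
  simp [pvMapVal, PySem.Dict.keys]

theorem pvGet?_mapVal (b : PySem.Dict (String × String × String × String × String) (List (List (String × String))))
    (k : String × String × String × String × String) :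
    (pvMapVal b).get? k = (b.get? k).map pvBest := by
  obtain ⟨items⟩ := b
  induction items with
  | nil => rfl
  | cons p t ih =>
    show (PySem.Dict.mk ((p.1, pvBest p.2) :: _)).get? k = _
    rw [PySem.Dict.get?_mk_cons, PySem.Dict.get?_mk_cons]
    split
    · rfl
    · exact ih

theorem pvContains_mapVal (b : PySem.Dict (String × String × String × String × String) (List (List (String × String))))
    (k : String × String × String × String × String) :
    (pvMapVal b).contains k = b.contains k := by
  rw [PySem.Dict.contains_eq_isSome_get?, PySem.Dict.contains_eq_isSome_get?, pvGet?_mapVal]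
  cases b.get? k <;> rfl

theorem pvMapVal_insert (b : PySem.Dict (String × String × String × String × String) (List (List (String × String))))
    (k : String × String × String × String × String) (v : List (List (String × String))) :
    pvMapVal (b.insert k v) = (pvMapVal b).insert k (pvBest v) := by
  apply PySem.Dict.ext
  by_cases hc : b.contains k = true
  · rw [show (pvMapVal (b.insert k v)).items = (b.insert k v).items.map (fun p => (p.1, pvBest p.2)) from rfl,
      PySem.Dict.items_insert_of_contains _ _ hc,
      PySem.Dict.items_insert_of_contains _ _ (by rw [pvContains_mapVal]; exact hc)]
    show (b.items.map _).map _ = (b.items.map _).map _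
    rw [List.map_map, List.map_map]
    refine List.map_congr_left (fun p _ => ?_)
    by_cases h : (p.1 == k) = true <;> simp [h, Function.comp]
  · rw [show (pvMapVal (b.insert k v)).items = (b.insert k v).items.map (fun p => (p.1, pvBest p.2)) from rfl,
      PySem.Dict.items_insert_of_not_contains _ _ (by simp [hc]),
      PySem.Dict.items_insert_of_not_contains _ _ (by rw [pvContains_mapVal]; simp [hc])]
    simp [pvMapVal]

theorem pvInsert_self (d : PySem.Dict (String × String × String × String × String) (List (String × String)))
    (k : String × String × String × String × String) (v : List (String × String))
    (hnd : d.keys.Nodup) (h : d.get? k = some v) : d.insert k v = d := by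
  apply PySem.Dict.ext
  have hc : d.contains k = true := by rw [PySem.Dict.contains_eq_isSome_get?, h]; rfl
  rw [PySem.Dict.items_insert_of_contains _ _ hc]
  have hmem : (k, v) ∈ d.items := (PySem.Dict.get?_eq_some_iff_mem_items d k v hnd).mp h
  have hmap : List.map (fun p => if (p.1 == k) = true then (k, v) else p) d.items
      = List.map id d.items := by
    refine List.map_congr_left (fun p hp => ?_)
    by_cases hk : (p.1 == k) = true
    · simp only [hk, if_true, id]
      have hp1 : p.1 = k := eq_of_beq hk
      -- nodup keys: two items with the same first component are equal
      have h1 : (d.items.map Prod.fst).Nodup := hnd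
      obtain ⟨i, hi, hip⟩ := List.getElem_of_mem hp
      obtain ⟨j, hj, hjq⟩ := List.getElem_of_mem hmem
      have hij : i = j := by
        by_contra hne
        have := List.Nodup.getElem_inj_iff (l := d.items.map Prod.fst) h1
          (i := i) (j := j) (hi := by simpa using hi) (hj := by simpa using hj)
        simp only [List.getElem_map, hip, hjq, hp1] at this
        exact hne (this.mp trivial)
      subst hij
      rw [← hip, hjq]
    · simp [hk]
  simpa using hmap

-- every group a stepB-fold produces is nonempty
theorem pvGroups_nonempty (rows : List (List (String × String)))
    (b : PySem.Dict (String × String × String × String × String) (List (List (String × String))))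
    (hb : ∀ p ∈ b.items, p.2 ≠ []) :
    ∀ p ∈ (rows.foldl (fun g row => g.modify (pvKey row) [] (· ++ [row])) b).items, p.2 ≠ [] := by
  induction rows generalizing b with
  | nil => exact hb
  | cons row rest ih =>
    refine ih _ (fun p hp => ?_)
    rcases (PySem.Dict.mem_items_insert _ _ _ _).mp hp with h | h
    · subst h; simp
    · exact hb p h.1

theorem pvNodup_step (b : PySem.Dict (String × String × String × String × String) (List (List (String × String))))
    (row : List (String × String)) (hnd : b.keys.Nodup) :
    (b.modify (pvKey row) [] (· ++ [row])).keys.Nodup := by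
  show (b.insert _ _).keys.Nodup
  by_cases hc : b.contains (pvKey row) = true
  · rw [PySem.Dict.keys_insert_of_contains _ _ hc]; exact hnd
  · rw [PySem.Dict.keys_insert_of_not_contains _ _ (by simp [hc])]
    refine List.Nodup.append hnd (List.nodup_singleton _) ?_
    intro x hx hy
    simp at hy
    subst hy
    exact hc ((PySem.Dict.contains_iff_mem_keys _ _).mpr hx)

-- main invariant: A's fold over any suffix, started from the pointwise-best image of B's groups dict
theorem pvMain (rows : List (List (String × String))) :
    ∀ (b : PySem.Dict (String × String × String × String × String) (List (List (String × String)))),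
      b.keys.Nodup → (∀ p ∈ b.items, p.2 ≠ []) →
      rows.foldl
        (fun latest row =>
          let key := pvKey row
          let created := pvCreated row
          match latest.get? key with
          | none => latest.insert key row
          | some current => if pvCreated current < created then latest.insert key row else latest)
        (pvMapVal b)
      = pvMapVal (rows.foldl (fun g row => g.modify (pvKey row) [] (· ++ [row])) b) := by
  induction rows with
  | nil => intro b _ _; rfl
  | cons row rest ih =>
    intro b hnd hne
    simp only [List.foldl]
    have hstep :
        (match (pvMapVal b).get? (pvKey row) with
          | none => (pvMapVal b).insert (pvKey row) row
          | some current =>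
              if pvCreated current < pvCreated row then (pvMapVal b).insert (pvKey row) row
              else pvMapVal b)
        = pvMapVal (b.modify (pvKey row) [] (· ++ [row])) := by
      rw [pvGet?_mapVal]
      cases hg : b.get? (pvKey row) with
      | none =>
        have hc : b.contains (pvKey row) = false := by
          rw [PySem.Dict.contains_eq_isSome_get?, hg]; rfl
        show (pvMapVal b).insert (pvKey row) row = _
        rw [show b.modify (pvKey row) [] (· ++ [row]) = b.insert (pvKey row) (b.getD (pvKey row) [] ++ [row]) from rfl,
          PySem.Dict.getD_of_not_contains _ _ hc, pvMapVal_insert]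
        rfl
      | some g =>
        have hgne : g ≠ [] := by
          intro h; subst h
          exact hne _ (PySem.Dict.mem_items_of_get?_eq_some _ hg) rfl
        rw [show b.modify (pvKey row) [] (· ++ [row]) = b.insert (pvKey row) (b.getD (pvKey row) [] ++ [row]) from rfl,
          PySem.Dict.getD_of_get?_eq_some _ _ hg, pvMapVal_insert, pvBest_append g hgne row]
        show (if pvCreated (pvBest g) < pvCreated row then (pvMapVal b).insert (pvKey row) row else pvMapVal b) = _
        split
        · rfl
        · rw [pvInsert_self _ _ _ (by rw [pvKeys_mapVal]; exact hnd)
            (by rw [pvGet?_mapVal, hg]; rfl)]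
    rw [hstep]
    exact ih _ (pvNodup_step b row hnd)
      (fun p hp => by
        rcases (PySem.Dict.mem_items_insert _ _ _ _).mp hp with h | h
        · subst h; simp
        · exact hne p h.1)

-- ===== VERDICT (by name: the statement is the Claim_ definition above) =====
theorem latest_rows_py_spec : Claim_equal_latest_rows_py := by
  intro rows _
  show latest_rows_py rows = latest_rows_py_alt rows
  unfold latest_rows_py latest_rows_py_alt
  rw [show (PySem.Dict.empty : PySem.Dict (String × String × String × String × String) (List (String × String))) = pvMapVal PySem.Dict.empty from rfl,
    pvMain rows PySem.Dict.empty (by simp [PySem.Dict.keys_empty]) (by intro p hp; simp [PySem.Dict.empty] at hp)]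
  set G := List.foldl (fun g row => g.modify (pvKey row) [] (· ++ [row])) PySem.Dict.empty rows with hG
  have hne : ∀ p ∈ G.items, p.2 ≠ [] :=
    pvGroups_nonempty rows PySem.Dict.empty (by intro p hp; simp [PySem.Dict.empty] at hp)
  show (pvMapVal G).values = G.values.map _
  simp only [pvMapVal, PySem.Dict.values, List.map_map]
  refine List.map_congr_left (fun p hp => ?_)
  have : PySem.List.max? p.2 pvCreated = some (pvBest p.2) := pvMax?_eq_pvBest p.2 (hne p hp)
  simp [Function.comp, this]
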